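-- pv_equiv track=rewrite | github.com/mind-protocol/serenissima | angels/tessere/voice_pipeline.py | extract_citizen_output
-- ===== SOURCE A (Python) =====
-- def extract_citizen_output(log_content):
--     """Extract clean output from Claude logs"""
--     # Look for actual content after the standard headers
--     lines = log_content.split('\n')
--
--     # Skip headers and system messages
--     content_start = False
--     clean_lines = []
--
--     for line in lines:
--         # Start capturing after we see actual content
--         if not content_start and line.strip() and not line.startswith('Contents of'):
--             content_start = True
--
--         if content_start:
--             # Skip system messages
--             if not (line.startswith('Contents of') or
--                    'Tool ran without' in line or
--                    'system-reminder' in line):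
--                 clean_lines.append(line)
--
--     return '\n'.join(clean_lines).strip()
-- ===== SOURCE B (Python) =====
-- def extract_citizen_output(log_content):
--     """Extract clean output from Claude logs"""
--     lines = log_content.split('\n')
--
--     def is_header(line):
--         return not line.strip() or line.startswith('Contents of')
--
--     # Phase 1: drop the leading header/blank prefix.
--     body = lines
--     while body and is_header(body[0]):
--         body = body[1:]
--
--     # Phase 2: filter out system messages from the remainder.
--     kept = [line for line in body
--             if not (line.startswith('Contents of')
--                     or 'Tool ran without' in line
--                     or 'system-reminder' in line)]
--
--     return '\n'.join(kept).strip()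
-- ===== Notes on version B (the rewrite author's own statement) =====
-- stated objective: simpler
-- what changed: Replaced the single flag-driven loop with two explicit phases: drop the leading header/blank prefix, then filter the remaining lines with one comprehension (no state flag).
import Mathlib
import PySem

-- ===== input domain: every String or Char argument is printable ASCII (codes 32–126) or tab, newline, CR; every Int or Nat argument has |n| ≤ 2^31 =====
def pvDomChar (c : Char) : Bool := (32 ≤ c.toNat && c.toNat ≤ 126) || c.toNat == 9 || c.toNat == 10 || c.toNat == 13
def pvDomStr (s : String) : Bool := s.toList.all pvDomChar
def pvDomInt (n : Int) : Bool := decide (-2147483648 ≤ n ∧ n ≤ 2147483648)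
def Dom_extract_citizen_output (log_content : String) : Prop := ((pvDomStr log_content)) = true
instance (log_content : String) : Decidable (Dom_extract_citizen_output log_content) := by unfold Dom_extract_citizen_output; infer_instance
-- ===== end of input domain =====

-- B restructures A's single flag-driven loop into two phases (drop header prefix, then filter); objective: simpler.

-- needle constants (named so proofs match them without unfolding the string literals)
def pvContentsOf : List Char := "Contents of".toList
def pvToolRan : List Char := "Tool ran without".toList
def pvSysRem : List Char := "system-reminder".toList

-- ===== PORT A =====
-- system-message test of A's inner 'if' (one helper for the or-chain)
def pvIsSystemA (line : List Char) : Bool :=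
  PySem.Chars.startswith line pvContentsOf ||
  PySem.Chars.isIn pvToolRan line ||
  PySem.Chars.isIn pvSysRem line

-- one iteration of A's for-loop: state = (content_start, clean_lines)
def pvStepA (st : Bool × List (List Char)) (line : List Char) : Bool × List (List Char) :=
  let cs := if !st.1 && !(PySem.Chars.strip line == []) &&
               !(PySem.Chars.startswith line pvContentsOf) then true else st.1
  if cs then
    if !(pvIsSystemA line) then (cs, st.2 ++ [line]) else (cs, st.2)
  else (cs, st.2)

def extract_citizen_output (log_content : String) : String :=
  let lines := PySem.Chars.splitOn log_content.toList "\n".toList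
  let r := lines.foldl pvStepA (false, [])
  String.ofList (PySem.Chars.strip (PySem.Chars.join "\n".toList r.2))

-- ===== PORT B =====
def pvIsHeaderB (line : List Char) : Bool :=
  PySem.Chars.strip line == [] || PySem.Chars.startswith line pvContentsOf

def pvKeepB (line : List Char) : Bool :=
  !(PySem.Chars.startswith line pvContentsOf ||
    PySem.Chars.isIn pvToolRan line ||
    PySem.Chars.isIn pvSysRem line)

def extract_citizen_output_alt (log_content : String) : String :=
  let lines := PySem.Chars.splitOn log_content.toList "\n".toList
  let body := lines.dropWhile pvIsHeaderB
  let kept := body.filter pvKeepB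
  String.ofList (PySem.Chars.strip (PySem.Chars.join "\n".toList kept))

-- ===== PRECONDITION & SPEC =====
def Spec_extract_citizen_output (log_content : String) (out : String) : Prop := out = extract_citizen_output_alt log_content
instance (log_content : String) (out : String) : Decidable (Spec_extract_citizen_output log_content out) := by unfold Spec_extract_citizen_output; infer_instance

-- ===== CLAIM (what is proved, stated in full; the proofs are below) =====
def Claim_equal_extract_citizen_output : Prop := ∀ (log_content : String), Dom_extract_citizen_output log_content → Spec_extract_citizen_output log_content (extract_citizen_output log_content)

-- ===== LEMMAS AND PROOFS =====

theorem pvKeepB_eq (line : List Char) : pvKeepB line = !pvIsSystemA line := rfl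

-- once the flag is set, A just filters the remaining lines
theorem pv_loop_true (lines : List (List Char)) : ∀ (acc : List (List Char)),
    lines.foldl pvStepA (true, acc) = (true, acc ++ lines.filter pvKeepB) := by
  induction lines with
  | nil => intro acc; simp
  | cons l t ih =>
    intro acc
    cases h : pvIsSystemA l <;>
      simp [List.foldl_cons, pvStepA, pvKeepB_eq, h, ih]

-- before the flag is set, A's loop computes B's dropWhile-then-filter
theorem pv_loop_main (lines : List (List Char)) :
    (lines.foldl pvStepA (false, [])).2 = (lines.dropWhile pvIsHeaderB).filter pvKeepB := by
  induction lines with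
  | nil => simp
  | cons l t ih =>
    simp only [List.foldl_cons, List.dropWhile_cons]
    by_cases hh : pvIsHeaderB l = true
    · -- header line: flag stays false, nothing appended
      have hstep : pvStepA (false, []) l = (false, []) := by
        simp only [pvIsHeaderB, Bool.or_eq_true] at hh
        rcases hh with h1 | h2
        · simp [pvStepA, h1]
        · simp [pvStepA, h2]
      rw [hstep]
      simp only [hh]
      simpa using ih
    · -- trigger line: flag turns true, line itself passes through the system filter
      have hh' : pvIsHeaderB l = false := by
        cases h : pvIsHeaderB l
        · rfl
        · exact absurd h hh
      obtain ⟨h1, h2⟩ : (PySem.Chars.strip l == []) = false ∧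
          PySem.Chars.startswith l pvContentsOf = false := by
        simpa [pvIsHeaderB] using hh'
      have hstep : pvStepA (false, []) l =
          (true, if pvKeepB l then [l] else []) := by
        cases h : pvIsSystemA l <;>
          simp [pvStepA, pvKeepB_eq, h, h1, h2]
      rw [hstep]
      simp only [hh', Bool.false_eq_true, if_false, List.filter_cons]
      by_cases hk : pvKeepB l = true <;> simp [hk, pv_loop_true]

-- ===== VERDICT (by name: the statement is the Claim_ definition above) =====
theorem extract_citizen_output_spec : Claim_equal_extract_citizen_output := by
  intro log_content _
  unfold Spec_extract_citizen_output extract_citizen_output extract_citizen_output_alt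
  simp [pv_loop_main]
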